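-- pv_equiv track=rewrite | github.com/uw-math-ai/PolyArithmeticCircuitsRL | Game-Board-Generation/pre-training-data/analyze_paths.py | collect_shortest_path_samples
-- ===== SOURCE A (Python) =====
-- import math
-- from typing import Deque, Dict, Iterable, List, Optional, Sequence, Set
--
-- def collect_shortest_path_samples(
--     node_id: str,
--     roots: Set[str],
--     predecessors: Dict[str, Set[str]],
--     limit: int,
--     order_hint: Dict[str, int],
-- ) -> List[List[str]]:
--     """Backtrack through stored predecessors to enumerate up to the requested shortest paths."""
--     if limit <= 0:
--         return []
--     samples: List[List[str]] = []
--     path: List[str] = []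
--
--     def dfs(current: str) -> None:
--         if len(samples) >= limit:
--             return
--         path.append(current)
--         if current in roots or not predecessors[current]:
--             samples.append(list(reversed(path)))
--             path.pop()
--             return
--         next_nodes = sorted(
--             predecessors[current],
--             key=lambda nid: (order_hint.get(nid, math.inf), nid),
--         )
--         for nxt in next_nodes:
--             dfs(nxt)
--             if len(samples) >= limit:
--                 break
--         path.pop()
--
--     dfs(node_id)
--     return samples
-- ===== SOURCE B (Python) =====
-- import math
--
--
-- def collect_shortest_path_samples(node_id, roots, predecessors, limit, order_hint):
--     """Iterative version: an explicit stack of (node, path_prefix) states replaces the recursive dfs."""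
--     if limit <= 0:
--         return []
--     samples = []
--     stack = [(node_id, [])]
--     while stack:
--         if len(samples) >= limit:
--             break
--         current, prefix = stack.pop()
--         path = prefix + [current]
--         if current in roots or not predecessors[current]:
--             samples.append(path[::-1])
--             continue
--         ordered = sorted(
--             predecessors[current],
--             key=lambda nid: (order_hint.get(nid, math.inf), nid),
--         )
--         for nxt in reversed(ordered):
--             stack.append((nxt, path))
--     return samples
-- ===== Notes on version B (the rewrite author's own statement) =====
-- stated objective: alternative
-- what changed: The recursive dfs with a shared mutable samples/path pair is replaced by a single loop over an explicit stack of (node, path_prefix) states, pushing sorted predecessors so the smallest is popped first.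
import Mathlib
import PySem

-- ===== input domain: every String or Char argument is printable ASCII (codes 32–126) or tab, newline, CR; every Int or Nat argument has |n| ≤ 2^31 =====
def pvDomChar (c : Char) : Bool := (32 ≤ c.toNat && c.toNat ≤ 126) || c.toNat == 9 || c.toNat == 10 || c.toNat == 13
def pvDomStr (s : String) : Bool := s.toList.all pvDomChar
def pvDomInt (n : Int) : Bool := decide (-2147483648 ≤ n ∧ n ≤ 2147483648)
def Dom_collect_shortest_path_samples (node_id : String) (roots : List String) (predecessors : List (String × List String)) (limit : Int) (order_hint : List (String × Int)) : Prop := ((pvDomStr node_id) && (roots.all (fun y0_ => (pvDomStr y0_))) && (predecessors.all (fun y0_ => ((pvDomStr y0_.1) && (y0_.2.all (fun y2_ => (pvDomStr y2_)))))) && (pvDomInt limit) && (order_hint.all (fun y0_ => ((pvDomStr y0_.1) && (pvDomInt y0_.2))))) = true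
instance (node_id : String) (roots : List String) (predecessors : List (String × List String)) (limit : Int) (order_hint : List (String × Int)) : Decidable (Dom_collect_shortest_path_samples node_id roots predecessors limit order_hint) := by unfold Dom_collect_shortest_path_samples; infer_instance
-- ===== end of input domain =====

-- B replaces A's recursive dfs (shared mutable samples/path) with an explicit stack of
-- (node, path-prefix) states popped in a single loop; same return value, same cost (objective: alternative).


-- ===== PORT A =====

-- predecessors[c]: first-match association-list lookup; a missing key is Python's KeyError,
-- excluded by Pre_, so the port may return [] there (which makes the node terminal).
def pvGetPreds (predecessors : List (String × List String)) (c : String) : List String :=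
  ((PySem.Dict.mk predecessors).get? c).getD []

-- sorted(predecessors[c], key=lambda nid: (order_hint.get(nid, math.inf), nid)) — the same
-- expression occurs verbatim in both Pythons, so both ports share this helper.  On Dom every
-- hint satisfies |h| ≤ 2^31, so math.inf is modelled exactly by the larger constant 2^31+1.
def pvChildren (predecessors : List (String × List String)) (order_hint : List (String × Int)) (c : String) : List String :=
  PySem.List.sorted2 (pvGetPreds predecessors c)
    (fun nid => PySem.Dict.getD (PySem.Dict.mk order_hint) nid 2147483649)
    (fun nid => nid)

-- total over preds of all values; bounds any pvChildren length (used by port B's gas)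
def pvP (predecessors : List (String × List String)) : Nat :=
  (predecessors.map (fun kv => kv.2.length)).sum

mutual
-- dfs(current): fuel = recursion-depth guard; on Pre_ inputs chains are acyclic through
-- distinct keys of predecessors, so depth ≤ predecessors.length + 1 and the guard never fires.
def pvDfsA (roots : List String) (predecessors : List (String × List String)) (limit : Int) (order_hint : List (String × Int)) : Nat → String → List String → List (List String) → List (List String)
  | 0, _, _, samples => samples
  | fuel + 1, current, path, samples =>
    if (samples.length : Int) ≥ limit then samples
    else
      let path' := path ++ [current]
      if current ∈ roots ∨ pvGetPreds predecessors current = [] then samples ++ [path'.reverse]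
      else pvLoopA roots predecessors limit order_hint fuel (pvChildren predecessors order_hint current) path'  samples
  termination_by fuel => (fuel, 0)

-- the 'for nxt in next_nodes: dfs(nxt); if len(samples) >= limit: break' loop
def pvLoopA (roots : List String) (predecessors : List (String × List String)) (limit : Int) (order_hint : List (String × Int)) : Nat → List String → List String → List (List String) → List (List String)
  | _, [], _, samples => samples
  | fuel, nxt :: rest, path', samples =>
    let s' := pvDfsA roots predecessors limit order_hint fuel nxt path' samples
    if (s'.length : Int) ≥ limit then s'
    else pvLoopA roots predecessors limit order_hint fuel rest path' s'
  termination_by fuel ns => (fuel, ns.length + 1)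
end

def collect_shortest_path_samples (node_id : String) (roots : List String) (predecessors : List (String × List String)) (limit : Int) (order_hint : List (String × Int)) : List (List String) :=
  if limit ≤ 0 then []
  else pvDfsA roots predecessors limit order_hint (predecessors.length + 2) node_id [] []

-- ===== PORT B =====

-- The Python stack is a list popped at the END; here the stack is kept reversed (head = top),
-- so Python's push of reversed(ordered) becomes prepending ordered as-is.  Each state carries
-- the same depth guard as port A (never fires on Pre_ inputs) and gas bounds the number of
-- pops so the loop is total in Lean (on Pre_ inputs the stack empties or limit is hit first).
def pvStepB (roots : List String) (predecessors : List (String × List String)) (limit : Int) (order_hint : List (String × Int)) : Nat → List (Nat × String × List String) → List (List String) → List (List String)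
  | 0, _, samples => samples
  | _ + 1, [], samples => samples
  | gas + 1, (0, _, _) :: rest, samples => pvStepB roots predecessors limit order_hint gas rest samples
  | gas + 1, (fuel + 1, current, pfx) :: rest, samples =>
    if (samples.length : Int) ≥ limit then samples
    else
      let path := pfx ++ [current]
      if current ∈ roots ∨ pvGetPreds predecessors current = [] then
        pvStepB roots predecessors limit order_hint gas rest (samples ++ [path.reverse])
      else
        pvStepB roots predecessors limit order_hint gas
          ((pvChildren predecessors order_hint current).map (fun n => (fuel, n, path)) ++ rest) samples

def collect_shortest_path_samples_alt (node_id : String) (roots : List String) (predecessors : List (String × List String)) (limit : Int) (order_hint : List (String × Int)) : List (List String) :=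
  if limit ≤ 0 then []
  else
    pvStepB roots predecessors limit order_hint
      ((pvP predecessors + 2) ^ (predecessors.length + 2))
      [(predecessors.length + 2, node_id, [])] []

-- ===== PRECONDITION & SPEC =====

-- edges the traversal follows out of c (roots are never expanded)
def pvSuccs (roots : List String) (predecessors : List (String × List String)) (c : String) : List String :=
  if c ∈ roots then [] else pvGetPreds predecessors c

-- nodes reachable along predecessor edges: one closure round adds all successors; pvP + 1
-- rounds reach the fixpoint since every addable node occurs in some predecessors value.
def pvReachAux (roots : List String) (predecessors : List (String × List String)) : Nat → List String → List String
  | 0, r => r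
  | n + 1, r => pvReachAux roots predecessors n (PySem.List.dedup (r ++ r.flatMap (pvSuccs roots predecessors)))

def pvReach (roots : List String) (predecessors : List (String × List String)) (start : List String) : List String :=
  pvReachAux roots predecessors (pvP predecessors + 1) start

-- Pre_ excludes inputs where some node reachable through the predecessor graph is neither a
-- root nor a key of predecessors (Python A can raise KeyError there) or lies on a cycle
-- (Python A can recurse forever); it is a closed-form over-approximation, so it also excludes
-- some inputs on which A returns because the limit prunes the traversal before the bad node.
def Pre_collect_shortest_path_samples (node_id : String) (roots : List String) (predecessors : List (String × List String)) (limit : Int) (order_hint : List (String × Int)) : Prop :=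
  (∀ c ∈ pvReach roots predecessors [node_id], c ∈ roots ∨ c ∈ predecessors.map (·.1)) ∧
  (∀ c ∈ pvReach roots predecessors [node_id], c ∉ pvReach roots predecessors (pvSuccs roots predecessors c))
instance (node_id : String) (roots : List String) (predecessors : List (String × List String)) (limit : Int) (order_hint : List (String × Int)) : Decidable (Pre_collect_shortest_path_samples node_id roots predecessors limit order_hint) := by unfold Pre_collect_shortest_path_samples; infer_instance

def pvWitness_collect_shortest_path_samples : String × List String × (List (String × List String)) × Int × (List (String × Int)) :=
  ("a", ["r"], [("a", ["r", "b"]), ("b", [])], 3, [("b", 0)])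

def Spec_collect_shortest_path_samples (node_id : String) (roots : List String) (predecessors : List (String × List String)) (limit : Int) (order_hint : List (String × Int)) (out : List (List String)) : Prop := out = collect_shortest_path_samples_alt node_id roots predecessors limit order_hint
instance (node_id : String) (roots : List String) (predecessors : List (String × List String)) (limit : Int) (order_hint : List (String × Int)) (out : List (List String)) : Decidable (Spec_collect_shortest_path_samples node_id roots predecessors limit order_hint out) := by unfold Spec_collect_shortest_path_samples; infer_instance

-- ===== CLAIM (what is proved, stated in full; the proofs are below) =====
def Claim_equal_collect_shortest_path_samples : Prop := ∀ (node_id : String) (roots : List String) (predecessors : List (String × List String)) (limit : Int) (order_hint : List (String × Int)), Dom_collect_shortest_path_samples node_id roots predecessors limit order_hint → Pre_collect_shortest_path_samples node_id roots predecessors limit order_hint → Spec_collect_shortest_path_samples node_id roots predecessors limit order_hint (collect_shortest_path_samples node_id roots predecessors limit order_hint)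

-- ===== LEMMAS AND PROOFS =====

-- the full (un-truncated) enumeration both traversals produce: for each shortest path from a
-- terminal t up to c, the reversed node list [t, …, c]; fuel mirrors the ports' depth guard.
def pvChains (roots : List String) (predecessors : List (String × List String)) (order_hint : List (String × Int)) : Nat → String → List (List String)
  | 0, _ => []
  | fuel + 1, c =>
    if c ∈ roots ∨ pvGetPreds predecessors c = [] then [[c]]
    else (pvChildren predecessors order_hint c).flatMap
      (fun n => (pvChains roots predecessors order_hint fuel n).map (· ++ [c]))

lemma pvChains_map_reverse (roots : List String) (predecessors : List (String × List String)) (order_hint : List (String × Int)) (fuel : Nat) (ns : List String) (c : String) (p : List String) :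
    ((ns.flatMap (fun n => (pvChains roots predecessors order_hint fuel n).map (· ++ [c]))).map (· ++ p.reverse))
      = (ns.flatMap (pvChains roots predecessors order_hint fuel)).map (· ++ (p ++ [c]).reverse) := by
  simp [List.map_flatMap, List.map_map, Function.comp_def, List.append_assoc]

lemma pvDfsA_eq (roots : List String) (predecessors : List (String × List String)) (limit : Int) (order_hint : List (String × Int)) (hlim : 1 ≤ limit) :
    ∀ (fuel : Nat) (current : String) (path : List String) (samples : List (List String)),
      pvDfsA roots predecessors limit order_hint fuel current path samples
        = samples ++ ((pvChains roots predecessors order_hint fuel current).map (· ++ path.reverse)).take (limit.toNat - samples.length) := by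
  intro fuel
  induction fuel with
  | zero => intro current path samples; simp [pvDfsA, pvChains]
  | succ f ih =>
    have loop : ∀ (ns : List String) (path' : List String) (samples : List (List String)),
        pvLoopA roots predecessors limit order_hint f ns path' samples
          = samples ++ ((ns.flatMap (pvChains roots predecessors order_hint f)).map (· ++ path'.reverse)).take (limit.toNat - samples.length) := by
      intro ns
      induction ns with
      | nil => intro path' samples; simp [pvLoopA]
      | cons n rest ihl =>
        intro path' samples
        rw [pvLoopA]
        simp only [ih]
        by_cases hbrk : ((samples ++ ((pvChains roots predecessors order_hint f n).map (· ++ path'.reverse)).take (limit.toNat - samples.length)).length : Int) ≥ limit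
        · rw [if_pos hbrk]
          rw [List.flatMap_cons, List.map_append, List.take_append]
          have h1 : limit.toNat - samples.length - ((pvChains roots predecessors order_hint f n).map (· ++ path'.reverse)).length = 0 := by
            simp at hbrk ⊢; omega
          rw [h1, List.take_zero, List.append_nil]
        · rw [if_neg hbrk, ihl]
          have hlen : limit.toNat - (samples ++ ((pvChains roots predecessors order_hint f n).map (· ++ path'.reverse)).take (limit.toNat - samples.length)).length
              = limit.toNat - samples.length - ((pvChains roots predecessors order_hint f n).map (· ++ path'.reverse)).length := by
            simp at hbrk ⊢; omega
          rw [hlen, List.flatMap_cons, List.map_append, List.take_append, List.append_assoc]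
    intro current path samples
    rw [pvDfsA]
    by_cases h1 : (samples.length : Int) ≥ limit
    · rw [if_pos h1]
      have h0 : limit.toNat - samples.length = 0 := by omega
      rw [h0, List.take_zero, List.append_nil]
    · rw [if_neg h1]
      show (if current ∈ roots ∨ pvGetPreds predecessors current = []
            then samples ++ [(path ++ [current]).reverse]
            else pvLoopA roots predecessors limit order_hint f (pvChildren predecessors order_hint current) (path ++ [current]) samples) = _
      by_cases h2 : current ∈ roots ∨ pvGetPreds predecessors current = []
      · rw [if_pos h2, pvChains, if_pos h2]
        obtain ⟨m, hm⟩ : ∃ m, limit.toNat - samples.length = m + 1 := ⟨limit.toNat - samples.length - 1, by omega⟩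
        rw [hm]
        simp
      · rw [if_neg h2, loop, pvChains, if_neg h2, pvChains_map_reverse]

-- expansion of a whole stack (top first)
def pvExpand (roots : List String) (predecessors : List (String × List String)) (order_hint : List (String × Int)) : List (Nat × String × List String) → List (List String)
  | [] => []
  | (fuel, c, p) :: rest =>
      (pvChains roots predecessors order_hint fuel c).map (· ++ p.reverse)
        ++ pvExpand roots predecessors order_hint rest

lemma pvExpand_append (roots : List String) (predecessors : List (String × List String)) (order_hint : List (String × Int)) (a b : List (Nat × String × List String)) :
    pvExpand roots predecessors order_hint (a ++ b) = pvExpand roots predecessors order_hint a ++ pvExpand roots predecessors order_hint b := by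
  induction a with
  | nil => simp [pvExpand]
  | cons e rest ih => obtain ⟨f, c, p⟩ := e; simp [pvExpand, ih]

lemma pvExpand_map (roots : List String) (predecessors : List (String × List String)) (order_hint : List (String × Int)) (fuel : Nat) (ns : List String) (q : List String) :
    pvExpand roots predecessors order_hint (ns.map (fun n => (fuel, n, q)))
      = ns.flatMap (fun n => (pvChains roots predecessors order_hint fuel n).map (· ++ q.reverse)) := by
  induction ns with
  | nil => simp [pvExpand]
  | cons n rest ih => simp [pvExpand, ih]

lemma pvGetPreds_length_le (predecessors : List (String × List String)) (c : String) :
    (pvGetPreds predecessors c).length ≤ pvP predecessors := by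
  induction predecessors with
  | nil => simp [pvGetPreds, PySem.Dict.get?]
  | cons kv rest ih =>
    obtain ⟨k, v⟩ := kv
    simp only [pvGetPreds, PySem.Dict.get?_mk_cons, pvP, List.map_cons, List.sum_cons] at *
    by_cases hk : (k == c) = true
    · rw [if_pos hk]
      simp only [Option.getD_some]
      omega
    · rw [if_neg hk]
      omega

lemma pvChildren_length_le (predecessors : List (String × List String)) (order_hint : List (String × Int)) (c : String) :
    (pvChildren predecessors order_hint c).length ≤ pvP predecessors := by
  have h := (PySem.List.sorted2_perm (pvGetPreds predecessors c)
    (fun nid => PySem.Dict.getD (PySem.Dict.mk order_hint) nid 2147483649)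
    (fun nid => nid) false).length_eq
  unfold pvChildren
  rw [h]
  exact pvGetPreds_length_le predecessors c

lemma pvStepB_eq (roots : List String) (predecessors : List (String × List String)) (limit : Int) (order_hint : List (String × Int)) (hlim : 1 ≤ limit) :
    ∀ (gas : Nat) (stack : List (Nat × String × List String)) (samples : List (List String)),
      (stack.map (fun e => (pvP predecessors + 2) ^ e.1)).sum ≤ gas →
      pvStepB roots predecessors limit order_hint gas stack samples
        = samples ++ (pvExpand roots predecessors order_hint stack).take (limit.toNat - samples.length) := by
  intro gas
  induction gas with
  | zero =>
    intro stack samples hsum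
    cases stack with
    | nil => simp [pvStepB, pvExpand]
    | cons e rest =>
      exfalso
      have h1 : 1 ≤ (pvP predecessors + 2) ^ e.1 := Nat.one_le_pow _ _ (by omega)
      simp only [List.map_cons, List.sum_cons] at hsum
      omega
  | succ g ihg =>
    intro stack samples hsum
    match stack with
    | [] => simp [pvStepB, pvExpand]
    | (0, c, p) :: rest =>
      rw [pvStepB, ihg rest samples (by simp only [List.map_cons, List.sum_cons, pow_zero] at hsum; omega)]
      simp [pvExpand, pvChains]
    | (f + 1, c, p) :: rest =>
      have hpow : 1 ≤ (pvP predecessors + 2) ^ f := Nat.one_le_pow _ _ (by omega)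
      have hpows : (pvP predecessors + 2) ^ (f + 1) = pvP predecessors * (pvP predecessors + 2) ^ f + 2 * (pvP predecessors + 2) ^ f := by ring
      simp only [List.map_cons, List.sum_cons] at hsum
      rw [pvStepB]
      by_cases h1 : (samples.length : Int) ≥ limit
      · rw [if_pos h1]
        have h0 : limit.toNat - samples.length = 0 := by omega
        rw [h0, List.take_zero, List.append_nil]
      · rw [if_neg h1]
        show (if c ∈ roots ∨ pvGetPreds predecessors c = []
              then pvStepB roots predecessors limit order_hint g rest (samples ++ [(p ++ [c]).reverse])
              else pvStepB roots predecessors limit order_hint g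
                ((pvChildren predecessors order_hint c).map (fun n => (f, n, p ++ [c])) ++ rest) samples) = _
        by_cases h2 : c ∈ roots ∨ pvGetPreds predecessors c = []
        · rw [if_pos h2, ihg rest _ (by omega)]
          rw [pvExpand, pvChains, if_pos h2]
          obtain ⟨m, hm⟩ : ∃ m, limit.toNat - samples.length = m + 1 := ⟨limit.toNat - samples.length - 1, by omega⟩
          have hm2 : limit.toNat - (samples ++ [(p ++ [c]).reverse]).length = m := by
            simp; omega
          rw [hm, hm2]
          simp
        · rw [if_neg h2]
          have hch := pvChildren_length_le predecessors order_hint c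
          have hmul : (pvChildren predecessors order_hint c).length * (pvP predecessors + 2) ^ f
              ≤ pvP predecessors * (pvP predecessors + 2) ^ f :=
            Nat.mul_le_mul_right _ hch
          have hsum' : ((((pvChildren predecessors order_hint c).map (fun n => (f, n, p ++ [c]))) ++ rest).map (fun e => (pvP predecessors + 2) ^ e.1)).sum ≤ g := by
            rw [List.map_append, List.sum_append, List.map_map]
            simp only [Function.comp_def]
            rw [PySem.List.sum_map_const_nat]
            omega
          rw [ihg _ samples hsum', pvExpand_append, pvExpand_map, pvExpand, pvChains, if_neg h2, pvChains_map_reverse, List.map_flatMap]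

-- ===== VERDICT (by name: the statement is the Claim_ definition above) =====
theorem collect_shortest_path_samples_spec : Claim_equal_collect_shortest_path_samples := by
  intro node_id roots predecessors limit order_hint _hDom _hPre
  unfold Spec_collect_shortest_path_samples
  unfold collect_shortest_path_samples collect_shortest_path_samples_alt
  by_cases hl : limit ≤ 0
  · simp [hl]
  · have hlim : 1 ≤ limit := by omega
    rw [if_neg hl, if_neg hl, pvDfsA_eq roots predecessors limit order_hint hlim,
        pvStepB_eq roots predecessors limit order_hint hlim _ _ _ (by simp)]
    simp [pvExpand]
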